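-- pv_equiv track=rewrite | github.com/qaqjx/v_loong | src/blend_loong.py | split_text_by_fragments
-- ===== SOURCE A (Python) =====
-- def split_text_by_fragments(A, B):
--     # 存储分割点及其对应的内容
--     split_points = []
--
--     # 将 B 中的每个片段在 A 中查找位置，并记录起始和结束位置
--     for fragment in B:
--         start = A.find(fragment)
--         if start != -1:  # 如果片段存在于 A 中
--             end = start + len(fragment)
--             split_points.append((start, end, fragment))
--
--     # 按照起始位置排序（确保按顺序分割）
--     split_points.sort(key=lambda x: x[0])
--
--     # 初始化结果列表
--     result = []
--     last_end = 0
--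
--     # 遍历所有分割点，逐步切割 A
--     for start, end, fragment in split_points:
--         # 添加片段前的部分
--         if last_end < start:
--             result.append(A[last_end:start])  # 添加未匹配的部分
--         # 添加匹配的片段
--         result.append(fragment)
--         last_end = end  # 更新上一个结束位置
--
--     # 添加最后一个片段之后的部分
--     if last_end < len(A):
--         result.append(A[last_end:])
--
--     return result
-- ===== SOURCE B (Python) =====
-- def split_text_by_fragments(A, B):
--     # Single left-to-right scan: at each position, match still-pending fragments
--     # (each fragment therefore matches at its leftmost occurrence), cutting as we go.
--     n = len(A)
--     pending = list(B)
--     matches = []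
--     for i in range(n + 1):
--         if not pending:
--             break
--         matches += [(i, f) for f in pending if A.startswith(f, i)]
--         pending = [f for f in pending if not A.startswith(f, i)]
--     result = []
--     last_end = 0
--     for s, f in matches:
--         if last_end < s:
--             result.append(A[last_end:s])
--         result.append(f)
--         last_end = s + len(f)
--     if last_end < n:
--         result.append(A[last_end:])
--     return result
-- ===== Notes on version B (the rewrite author's own statement) =====
-- stated objective: alternative
-- what changed: Replaces per-fragment str.find plus a stability-dependent sort with a single left-to-right scan over positions that matches still-pending fragments (each at its leftmost occurrence, already in sorted order) and cuts as it goes.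
import Mathlib
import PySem

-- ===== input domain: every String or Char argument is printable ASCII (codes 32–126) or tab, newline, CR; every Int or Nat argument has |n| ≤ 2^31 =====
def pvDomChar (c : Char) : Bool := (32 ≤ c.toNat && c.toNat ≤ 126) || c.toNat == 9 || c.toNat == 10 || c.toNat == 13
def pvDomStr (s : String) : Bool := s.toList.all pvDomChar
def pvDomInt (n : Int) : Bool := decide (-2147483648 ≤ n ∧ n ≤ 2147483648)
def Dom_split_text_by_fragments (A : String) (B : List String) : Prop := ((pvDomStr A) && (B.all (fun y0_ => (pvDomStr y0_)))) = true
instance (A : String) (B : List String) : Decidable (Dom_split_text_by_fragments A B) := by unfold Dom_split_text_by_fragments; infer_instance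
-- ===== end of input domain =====

-- B replaces A's per-fragment str.find + stable sort with one left-to-right scan over
-- positions matching still-pending fragments (alternative algorithm, same results).

-- ===== PORT A =====
def split_text_by_fragments (A : String) (B : List String) : List String :=
  -- split_points: for fragment in B, start = A.find(fragment); record (start, end, fragment) if found
  let split_points : List (Int × Int × String) :=
    B.foldl (fun sp fragment =>
      let start := PySem.Str.find A fragment
      if start ≠ -1 then sp ++ [(start, start + PySem.Str.len fragment, fragment)] else sp) []
  -- split_points.sort(key=lambda x: x[0])
  let split_points := PySem.List.sorted split_points (fun x => x.1)
  -- cut loop with (result, last_end)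
  let st : List String × Int :=
    split_points.foldl (fun acc t =>
      let result := if acc.2 < t.1 then acc.1 ++ [PySem.Str.slice A (some acc.2) (some t.1)] else acc.1
      (result ++ [t.2.2], t.2.1)) ([], 0)
  if st.2 < PySem.Str.len A then st.1 ++ [PySem.Str.slice A (some st.2)] else st.1

-- ===== PORT B =====
-- the scan loop of Source B: for i in range(n+1): break if no pending; collect matches, shrink pending.
-- A.startswith(f, i) is ported as startswith on A.toList.drop i.toNat — exact for the
-- nonnegative i that range(n+1) produces.
def altScan (A : String) : List Int → List String → List (Int × String)
  | [], _ => []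
  | i :: rest, pending =>
    if pending.isEmpty then []
    else
      (pending.filter (fun f => PySem.Chars.startswith (A.toList.drop i.toNat) f.toList)).map
          (fun f => (i, f))
        ++ altScan A rest
            (pending.filter (fun f => ! PySem.Chars.startswith (A.toList.drop i.toNat) f.toList))

def split_text_by_fragments_alt (A : String) (B : List String) : List String :=
  let n := PySem.Str.len A
  let ms := altScan A (PySem.List.pyRange 0 (n + 1)) B
  let st : List String × Int :=
    ms.foldl (fun acc m =>
      let result := if acc.2 < m.1 then acc.1 ++ [PySem.Str.slice A (some acc.2) (some m.1)] else acc.1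
      (result ++ [m.2], m.1 + PySem.Str.len m.2)) ([], 0)
  if st.2 < n then st.1 ++ [PySem.Str.slice A (some st.2)] else st.1

-- ===== PRECONDITION & SPEC =====
def Spec_split_text_by_fragments (A : String) (B : List String) (out : List String) : Prop := out = split_text_by_fragments_alt A B
instance (A : String) (B : List String) (out : List String) : Decidable (Spec_split_text_by_fragments A B out) := by unfold Spec_split_text_by_fragments; infer_instance

-- ===== CLAIM (what is proved, stated in full; the proofs are below) =====
def Claim_equal_split_text_by_fragments : Prop := ∀ (A : String) (B : List String), Dom_split_text_by_fragments A B → Spec_split_text_by_fragments A B (split_text_by_fragments A B)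

-- ===== LEMMAS AND PROOFS =====

-- A's split_points, as filter-then-map
def tripOf (A f : String) : Int × Int × String :=
  (PySem.Str.find A f, PySem.Str.find A f + PySem.Str.len f, f)

def trips (A : String) (P : List String) : List (Int × Int × String) :=
  (P.filter (fun f => PySem.Str.find A f != -1)).map (tripOf A)

lemma foldA (A : String) (P : List String) (sp : List (Int × Int × String)) :
    P.foldl (fun sp fragment =>
        if PySem.Str.find A fragment ≠ -1 then
          sp ++ [(PySem.Str.find A fragment, PySem.Str.find A fragment + PySem.Str.len fragment, fragment)]
        else sp) sp
      = sp ++ trips A P := by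
  induction P generalizing sp with
  | nil => simp [trips]
  | cons f P ih =>
    rw [List.foldl_cons]
    by_cases h : PySem.Str.find A f = -1
    · rw [if_neg (fun hc => hc h), ih]
      have h' : PySem.Chars.find A.toList f.toList = -1 := by
        simpa using h
      have : trips A (f :: P) = trips A P := by simp [trips, h']
      rw [this]
    · rw [if_pos h, ih]
      have h' : ¬ PySem.Chars.find A.toList f.toList = -1 := by
        simpa using h
      have : trips A (f :: P) = tripOf A f :: trips A P := by
        simp [trips, h']
      rw [this, tripOf]
      simp

lemma insertBy_append_left {α : Type} (before : α → α → Bool) (x : α) (F S : List α)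
    (h : ∀ y ∈ F, before x y = false) :
    PySem.List.insertBy before x (F ++ S) = F ++ PySem.List.insertBy before x S := by
  induction F with
  | nil => rfl
  | cons y F ih =>
    have hy := h y (by simp)
    simp [PySem.List.insertBy, hy, ih (fun z hz => h z (by simp [hz]))]

lemma sorted_extract_min {α : Type} (key : α → Int) (m : Int) (l : List α)
    (h : ∀ x ∈ l, m ≤ key x) :
    PySem.List.sorted l key
      = l.filter (fun x => key x == m)
        ++ PySem.List.sorted (l.filter (fun x => key x != m)) key := by
  induction l using List.reverseRecOn with
  | nil => simp [PySem.List.sorted_eq_foldl_insertBy]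
  | append_singleton l x ih =>
    have hl : ∀ y ∈ l, m ≤ key y := fun y hy => h y (by simp [hy])
    have hx : m ≤ key x := h x (by simp)
    have hstep : PySem.List.sorted (l ++ [x]) key
        = PySem.List.insertBy (fun a b => decide (key a < key b)) x (PySem.List.sorted l key) := by
      simp [PySem.List.sorted_eq_foldl_insertBy]
    have hS : ∀ y ∈ PySem.List.sorted (l.filter (fun z => key z != m)) key, m < key y := by
      intro y hy
      rw [PySem.List.mem_sorted] at hy
      rcases List.mem_filter.mp hy with ⟨hyl, hne⟩
      rcases lt_or_eq_of_le (hl y hyl) with h' | h'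
      · exact h'
      · simp [← h'] at hne
    by_cases hkx : key x = m
    · rw [hstep, ih hl]
      rw [insertBy_append_left _ _ _ _ (by
        intro y hy
        rcases List.mem_filter.mp hy with ⟨_, he⟩
        simp only [beq_iff_eq] at he
        simp [hkx, he])]
      have : PySem.List.insertBy (fun a b => decide (key a < key b)) x
          (PySem.List.sorted (l.filter (fun z => key z != m)) key)
          = x :: PySem.List.sorted (l.filter (fun z => key z != m)) key := by
        cases hs : PySem.List.sorted (l.filter (fun z => key z != m)) key with
        | nil => simp [PySem.List.insertBy]
        | cons y ys =>
          have : key x < key y := by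
            rw [hkx]; exact hS y (by rw [hs]; simp)
          simp [PySem.List.insertBy, this]
      rw [this]
      simp [List.filter_append, hkx]
    · have hmlt : m < key x := lt_of_le_of_ne hx (fun h' => hkx h'.symm)
      rw [hstep, ih hl]
      rw [insertBy_append_left _ _ _ _ (by
        intro y hy
        rcases List.mem_filter.mp hy with ⟨_, he⟩
        simp only [beq_iff_eq] at he
        simp [he]
        omega)]
      have hR : PySem.List.sorted ((l ++ [x]).filter (fun z => key z != m)) key
          = PySem.List.insertBy (fun a b => decide (key a < key b)) x
              (PySem.List.sorted (l.filter (fun z => key z != m)) key) := by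
        rw [List.filter_append]
        simp only [List.filter_cons, List.filter_nil]
        rw [if_pos (by simp [hkx])]
        simp [PySem.List.sorted_eq_foldl_insertBy]
      rw [hR, List.filter_append]
      simp [hkx]

-- find = k when f matches at k but nowhere earlier
lemma find_eq_of_sw (cs sub : List Char) (k : Nat)
    (hinv : ∀ j, j < k → ¬ sub <+: cs.drop j) (hsw : sub <+: cs.drop k) :
    PySem.Chars.find cs sub = (k : Int) := by
  have hin : PySem.Chars.isIn sub cs = true :=
    (PySem.Chars.exists_prefix_drop_iff_isIn sub cs).mp ⟨k, hsw⟩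
  have hnn : 0 ≤ PySem.Chars.find cs sub :=
    (PySem.Chars.find_nonneg_iff cs sub).mpr ((PySem.Chars.isIn_iff_infix sub cs).mp hin)
  rcases PySem.Chars.find_spec hnn with ⟨hpre, hmin⟩
  have h1 : ¬ (PySem.Chars.find cs sub).toNat < k := fun h => hinv _ h hpre
  have h2 : ¬ k < (PySem.Chars.find cs sub).toNat := fun h => hmin k h hsw
  omega

lemma le_find_of_found (cs sub : List Char) (k : Nat)
    (hinv : ∀ j, j < k → ¬ sub <+: cs.drop j)
    (hfound : PySem.Chars.find cs sub ≠ -1) :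
    (k : Int) ≤ PySem.Chars.find cs sub := by
  have hnn : 0 ≤ PySem.Chars.find cs sub := by
    have := PySem.Chars.neg_one_le_find cs sub
    omega
  rcases PySem.Chars.find_spec hnn with ⟨hpre, _⟩
  have : ¬ (PySem.Chars.find cs sub).toNat < k := fun h => hinv _ h hpre
  omega

lemma sw_of_find_eq (cs sub : List Char) (k : Nat)
    (hfk : PySem.Chars.find cs sub = (k : Int)) : sub <+: cs.drop k := by
  have hnn : 0 ≤ PySem.Chars.find cs sub := by omega
  rcases PySem.Chars.find_spec hnn with ⟨hpre, _⟩
  rw [hfk] at hpre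
  simpa using hpre

-- the central lemma: the scan emits exactly A's sorted split points
lemma scan_eq (A : String) : ∀ (d k : Nat) (P : List String),
    k + d = A.toList.length + 1 →
    (∀ f ∈ P, ∀ j, j < k → ¬ (f.toList <+: A.toList.drop j)) →
    (altScan A ((List.range' k d).map Int.ofNat) P).map
        (fun m => (m.1, m.1 + PySem.Str.len m.2, m.2))
      = PySem.List.sorted (trips A P) (fun t => t.1) := by
  intro d
  induction d with
  | zero =>
    intro k P hk hinv
    have htr : trips A P = [] := by
      unfold trips
      rw [List.filter_eq_nil_iff.mpr, List.map_nil]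
      intro f hf hfound
      have hne : PySem.Chars.find A.toList f.toList ≠ -1 := by
        simpa using hfound
      have hnn : 0 ≤ PySem.Chars.find A.toList f.toList := by
        have := PySem.Chars.neg_one_le_find A.toList f.toList
        omega
      rcases PySem.Chars.find_spec hnn with ⟨hpre, _⟩
      have hle := PySem.Chars.find_le_length A.toList f.toList
      exact hinv f hf _ (by omega) hpre
    rw [htr]
    simp [altScan, PySem.List.sorted_eq_foldl_insertBy]
  | succ d ih =>
    intro k P hk hinv
    rcases P with _ | ⟨f0, P0⟩
    · simp [altScan, List.range'_succ, trips, PySem.List.sorted_eq_foldl_insertBy]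
    set P : List String := f0 :: P0 with hP
    -- facts about find for members of P
    have hfind_ge : ∀ f ∈ P, PySem.Chars.find A.toList f.toList ≠ -1 →
        (k : Int) ≤ PySem.Chars.find A.toList f.toList := by
      intro f hf hne
      exact le_find_of_found A.toList f.toList k (hinv f hf) hne
    have hfind_eq : ∀ f ∈ P, PySem.Chars.startswith (A.toList.drop k) f.toList = true →
        PySem.Chars.find A.toList f.toList = (k : Int) := by
      intro f hf hsw
      exact find_eq_of_sw A.toList f.toList k (hinv f hf)
        ((PySem.Chars.startswith_iff _ _).mp hsw)
    have hfind_ne : ∀ f ∈ P, PySem.Chars.startswith (A.toList.drop k) f.toList = false →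
        PySem.Chars.find A.toList f.toList ≠ (k : Int) := by
      intro f hf hsw heq
      have := sw_of_find_eq A.toList f.toList k heq
      rw [← PySem.Chars.startswith_iff] at this
      simp [hsw] at this
    -- key lower bound for extract_min
    have hge : ∀ t ∈ trips A P, (k : Int) ≤ t.1 := by
      intro t ht
      unfold trips at ht
      rcases List.mem_map.mp ht with ⟨f, hf, rfl⟩
      rcases List.mem_filter.mp hf with ⟨hfP, hfound⟩
      exact hfind_ge f hfP (by simpa [PySem.Str.find_eq] using hfound)
    rw [sorted_extract_min (fun t => t.1) (k : Int) (trips A P) hge]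
    -- unfold one scan step
    rw [List.range'_succ, List.map_cons]
    have hne : (P.isEmpty) = false := by simp [hP]
    rw [altScan, if_neg (by simp [hne])]
    rw [List.map_append, List.map_map]
    have htoNat : (Int.ofNat k).toNat = k := by simp
    rw [htoNat]
    -- the recursive call via ih
    have hinv' : ∀ f ∈ P.filter (fun f => ! PySem.Chars.startswith (A.toList.drop k) f.toList),
        ∀ j, j < k + 1 → ¬ (f.toList <+: A.toList.drop j) := by
      intro f hf j hj
      rcases List.mem_filter.mp hf with ⟨hfP, hnsw⟩
      rcases Nat.lt_succ_iff_lt_or_eq.mp hj with h' | h'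
      · exact hinv f hfP j h'
      · subst h'
        intro hpre
        rw [← PySem.Chars.startswith_iff] at hpre
        simp [hpre] at hnsw
    rw [ih (k + 1) _ (by omega) hinv']
    congr 1
    · -- matched block = filter (key = k) of the split points
      have hcomp : (fun m => (m.1, m.1 + PySem.Str.len m.2, m.2)) ∘ (fun f => (Int.ofNat k, f))
          = fun f => ((Int.ofNat k : Int), (Int.ofNat k : Int) + PySem.Str.len f, f) := rfl
      rw [hcomp]
      unfold trips
      rw [List.filter_map, List.filter_filter]
      refine ((congrArg (List.map (tripOf A)) (List.filter_congr (fun f hfP => ?_))).trans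
        (List.map_congr_left (fun f hf => ?_))).symm
      · cases hsw : PySem.Chars.startswith (A.toList.drop k) f.toList with
        | true =>
          have hfk := hfind_eq f hfP hsw
          simp [Function.comp, tripOf, PySem.Str.find_eq, hfk]
        | false =>
          have hfk := hfind_ne f hfP hsw
          simp [Function.comp, tripOf, PySem.Str.find_eq, hfk]
      · rcases List.mem_filter.mp hf with ⟨hfP, hsw⟩
        have hfk := hfind_eq f hfP hsw
        simp [tripOf, PySem.Str.find_eq, hfk]
    · -- unmatched tail: filter (key ≠ k) = split points of the new pending
      congr 1
      unfold trips
      rw [List.filter_map, List.filter_filter, List.filter_filter]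
      exact congrArg (List.map (tripOf A)) (List.filter_congr (fun f hfP => by
        cases hsw : PySem.Chars.startswith (A.toList.drop k) f.toList with
        | true =>
          have hfk := hfind_eq f hfP hsw
          simp [Function.comp, tripOf, PySem.Str.find_eq, hfk]
        | false =>
          have hfk := hfind_ne f hfP hsw
          by_cases hfound : PySem.Chars.find A.toList f.toList = -1
          · simp [Function.comp, tripOf, PySem.Str.find_eq, hfound]
          · simp [Function.comp, tripOf, PySem.Str.find_eq, hfound, hfk]))

-- the two cut loops agree on the same match sequence
lemma cut_eq (A : String) (ms : List (Int × String)) (st : List String × Int) :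
    (ms.map (fun m => (m.1, m.1 + PySem.Str.len m.2, m.2))).foldl
        (fun acc t =>
          ((if acc.2 < t.1 then acc.1 ++ [PySem.Str.slice A (some acc.2) (some t.1)] else acc.1)
              ++ [t.2.2], t.2.1)) st
      = ms.foldl
          (fun acc m =>
            ((if acc.2 < m.1 then acc.1 ++ [PySem.Str.slice A (some acc.2) (some m.1)] else acc.1)
                ++ [m.2], m.1 + PySem.Str.len m.2)) st := by
  induction ms generalizing st with
  | nil => rfl
  | cons m ms ih =>
    rw [List.map_cons, List.foldl_cons, List.foldl_cons]
    exact ih _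

-- ===== VERDICT (by name: the statement is the Claim_ definition above) =====
theorem split_text_by_fragments_spec : Claim_equal_split_text_by_fragments := by
  intro A B _
  unfold Spec_split_text_by_fragments split_text_by_fragments split_text_by_fragments_alt
  dsimp only
  rw [foldA A B [], List.nil_append]
  have hpos : PySem.List.pyRange 0 (PySem.Str.len A + 1)
      = List.map Int.ofNat (List.range' 0 (A.toList.length + 1)) := by
    rw [PySem.Str.len_eq]
    have : ((A.toList.length : Int) + 1) = ((A.toList.length + 1 : Nat) : Int) := by push_cast; ring
    rw [this, PySem.List.pyRange_zero_natCast, List.range_eq_range']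
    rfl
  rw [hpos]
  have hscan := scan_eq A (A.toList.length + 1) 0 B (by omega) (by intro f hf j hj; omega)
  rw [← hscan, cut_eq]
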